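-- pv_equiv track=rewrite | github.com/zelink91/Zelink | NSI Prevert 2022/copies/sujet 07 Matysse 14h30/sujet 7 ex 1.py | maxi
-- ===== SOURCE A (Python) =====
-- def maxi(tab):
--     a=0
--     b=0
--     for i in range(len(tab)-1):
--         if tab[i]<tab[i+1]:
--             a+=1
--             b=tab[i+1]
--
--     return (b,a)
-- ===== SOURCE B (Python) =====
-- def maxi(tab):
--     n = len(tab)
--     a = sum(1 for i in range(n - 1) if tab[i] < tab[i + 1])
--     b = 0
--     for i in range(n - 1, 0, -1):
--         if tab[i - 1] < tab[i]:
--             b = tab[i]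
--             break
--     return (b, a)
-- ===== Notes on version B (the rewrite author's own statement) =====
-- stated objective: alternative
-- what changed: Replaces the single fused forward loop by two differently-shaped passes: a 0/1-sum over adjacent pairs for the ascent count, and a backward early-exit scan that stops at the first ascent from the end for the last-ascent value.
import Mathlib
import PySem

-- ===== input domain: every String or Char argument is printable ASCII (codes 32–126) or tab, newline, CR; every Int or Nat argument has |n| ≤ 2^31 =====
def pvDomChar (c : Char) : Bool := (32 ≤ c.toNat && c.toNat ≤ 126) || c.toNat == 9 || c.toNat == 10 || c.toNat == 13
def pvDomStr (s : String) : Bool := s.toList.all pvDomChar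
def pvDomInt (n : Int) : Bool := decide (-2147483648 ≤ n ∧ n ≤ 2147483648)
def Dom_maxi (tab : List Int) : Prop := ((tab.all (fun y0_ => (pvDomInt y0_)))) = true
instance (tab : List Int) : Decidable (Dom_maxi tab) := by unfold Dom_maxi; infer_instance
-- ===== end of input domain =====

-- B splits A's fused forward loop into two passes: a 0/1-sum counting ascents and a backward early-exit scan for the last ascent value (objective: alternative decomposition).


-- ===== PORT A =====
-- indices produced by range(len(tab)-1) are always in range, so pyGetD's default 0 is never read
def maxi (tab : List Int) : Int × Int :=
  (PySem.List.pyRange 0 ((tab.length : Int) - 1) 1).foldl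
    (fun (st : Int × Int) i =>
      if PySem.List.pyGetD tab i 0 < PySem.List.pyGetD tab (i + 1) 0 then
        (PySem.List.pyGetD tab (i + 1) 0, st.2 + 1)
      else st)
    (0, 0)

-- ===== PORT B =====
-- backward scan with early exit: first i (descending) with tab[i-1] < tab[i] yields tab[i]
def maxiAltBack (tab : List Int) : List Int → Int
  | [] => 0
  | i :: rest =>
      if PySem.List.pyGetD tab (i - 1) 0 < PySem.List.pyGetD tab i 0 then
        PySem.List.pyGetD tab i 0
      else maxiAltBack tab rest

def maxi_alt (tab : List Int) : Int × Int :=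
  let n : Int := tab.length
  let a : Int :=
    ((PySem.List.pyRange 0 (n - 1) 1).map
      (fun i => if PySem.List.pyGetD tab i 0 < PySem.List.pyGetD tab (i + 1) 0 then (1 : Int) else 0)).sum
  let b : Int := maxiAltBack tab (PySem.List.pyRange (n - 1) 0 (-1))
  (b, a)

-- ===== PRECONDITION & SPEC =====
def Spec_maxi (tab : List Int) (out : Int × Int) : Prop := out = maxi_alt tab
instance (tab : List Int) (out : Int × Int) : Decidable (Spec_maxi tab out) := by unfold Spec_maxi; infer_instance

-- ===== CLAIM (what is proved, stated in full; the proofs are below) =====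
def Claim_equal_maxi : Prop := ∀ (tab : List Int), Dom_maxi tab → Spec_maxi tab (maxi tab)

-- ===== LEMMAS AND PROOFS =====

-- the fused forward fold up to m equals (backward scan over m..1, 0/1-sum over 0..m-1)
theorem maxi_fold_eq (tab : List Int) (m : Nat) :
    (PySem.List.pyRange 0 (m : Int) 1).foldl
      (fun (st : Int × Int) i =>
        if PySem.List.pyGetD tab i 0 < PySem.List.pyGetD tab (i + 1) 0 then
          (PySem.List.pyGetD tab (i + 1) 0, st.2 + 1)
        else st)
      (0, 0)
    = (maxiAltBack tab (PySem.List.pyRange (m : Int) 0 (-1)),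
       ((PySem.List.pyRange 0 (m : Int) 1).map
         (fun i => if PySem.List.pyGetD tab i 0 < PySem.List.pyGetD tab (i + 1) 0 then (1 : Int) else 0)).sum) := by
  induction m with
  | zero =>
      simp [PySem.List.pyRange_one_eq_nil, PySem.List.pyRange_neg_one_eq_nil, maxiAltBack]
  | succ k ih =>
      rw [show ((k + 1 : Nat) : Int) = (k : Int) + 1 by push_cast; ring]
      rw [PySem.List.pyRange_one_succ_right (by positivity)]
      rw [PySem.List.pyRange_neg_one_cons (by positivity)]
      rw [List.foldl_append, List.map_append, List.sum_append, ih]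
      simp only [List.foldl_cons, List.foldl_nil, List.map_cons, List.map_nil, List.sum_cons,
        List.sum_nil, maxiAltBack]
      rw [show (k : Int) + 1 - 1 = (k : Int) by ring]
      split_ifs <;> simp

-- ===== VERDICT (by name: the statement is the Claim_ definition above) =====
theorem maxi_spec : Claim_equal_maxi := by
  intro tab _
  unfold Spec_maxi maxi maxi_alt
  rcases tab with _ | ⟨x, xs⟩
  · decide
  · have hlen : ((x :: xs).length : Int) - 1 = (xs.length : Int) := by
      simp
    simp only [hlen]
    exact maxi_fold_eq (x :: xs) xs.length
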